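-- pv_equiv track=rewrite | github.com/jakujobi/Scrap-Pad | Discrete_Math/MathQ26-1.py | K
-- ===== SOURCE A (Python) =====
-- from math import factorial
--
-- def K(m, r, n):
--     result = 0
--     for k in range(n + 1):
--         sign = (-1) ** k
--         binomial_coeff = factorial(n) // (factorial(k) * factorial(n - k))
--         stirling_number = (n - k) ** r
--         result += sign * binomial_coeff * stirling_number
--     return result // (m ** r)
--
-- m = 5  # total number of car types
--
-- r = 6  # total number of draws
-- ===== SOURCE B (Python) =====
-- def K(m, r, n):
--     # Forward-difference table: the alternating binomial sum equals the n-th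
--     # finite difference of j**r at 0, computed with no binomials or factorials.
--     if n < 0:
--         return 0
--     diffs = [j ** r for j in range(n + 1)]
--     for _ in range(n):
--         diffs = [b - a for a, b in zip(diffs, diffs[1:])]
--     return diffs[0] // m ** r
-- ===== Notes on version B (the rewrite author's own statement) =====
-- stated objective: alternative
-- what changed: B replaces the term-by-term alternating binomial sum (factorials per term) by an entirely different algorithm: it tabulates j**r for j=0..n and takes n forward-difference passes over the table, since the alternating sum is exactly the n-th finite difference of j**r at 0 — no binomials, factorials or signs appear at all.
-- outside the precondition, e.g. on K(-1, -1, -1): A returns -0.0, B returns 0; on K(0, 2, 3): A raises ZeroDivisionError, B raises ZeroDivisionError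
import Mathlib
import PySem

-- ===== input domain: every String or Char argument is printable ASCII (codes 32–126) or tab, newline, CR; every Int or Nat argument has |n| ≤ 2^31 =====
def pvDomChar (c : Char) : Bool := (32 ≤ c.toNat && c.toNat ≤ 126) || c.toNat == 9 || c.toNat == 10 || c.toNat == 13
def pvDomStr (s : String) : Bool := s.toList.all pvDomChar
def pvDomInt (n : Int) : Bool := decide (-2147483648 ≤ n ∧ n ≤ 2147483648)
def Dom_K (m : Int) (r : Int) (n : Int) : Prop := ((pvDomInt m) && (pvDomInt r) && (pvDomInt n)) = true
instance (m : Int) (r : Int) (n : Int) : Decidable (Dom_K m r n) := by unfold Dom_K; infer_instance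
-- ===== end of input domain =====

-- B computes the same alternating binomial sum as the n-th forward difference of j**r at 0
-- via a difference table — no binomials or factorials at all (objective: alternative algorithm).

-- ===== PORT A =====
-- math.factorial; exact for k ≥ 0, which is the only case A's loop reaches (0 ≤ k ≤ n)
def pyFact (k : Int) : Int := (Nat.factorial k.toNat : Int)

-- A's loop body: result += sign * binomial_coeff * stirling_number
def stepA (r : Int) (n : Int) (result : Int) (k : Int) : Int :=
  let sign : Int := (-1) ^ k.toNat
  let binomial_coeff : Int := PySem.Int.floordiv (pyFact n) (pyFact k * pyFact (n - k))
  let stirling_number : Int := (n - k) ^ r.toNat   -- r ≥ 0 by Pre_K, so ^ toNat is exact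
  result + sign * binomial_coeff * stirling_number

def K (m : Int) (r : Int) (n : Int) : Int :=
  let result := (PySem.List.pyRange 0 (n + 1) 1).foldl (stepA r n) 0
  PySem.Int.floordiv result (m ^ r.toNat)   -- m ** r with r ≥ 0 by Pre_K

-- ===== PORT B =====
-- one differencing pass: [b - a for a, b in zip(diffs, diffs[1:])]
def diffPass (l : List Int) : List Int := List.zipWith (fun a b => b - a) l l.tail

def K_alt (m : Int) (r : Int) (n : Int) : Int :=
  if n < 0 then 0
  else
    let diffs := (PySem.List.pyRange 0 (n + 1) 1).map (fun j => j ^ r.toNat)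
    let final := (List.range n.toNat).foldl (fun l _ => diffPass l) diffs
    -- diffs[0]: after the n passes the list has exactly one element, so headD 0 is
    -- exactly Python's diffs[0] here (proved via iter_diff below)
    PySem.Int.floordiv (final.headD 0) (m ^ r.toNat)

-- ===== PRECONDITION & SPEC =====
-- Pre_K excludes r < 0 (Python m**r and (n-k)**r are floats there, so A returns a float,
-- not an int) and m = 0 with r > 0 (A raises ZeroDivisionError).
def Pre_K (m : Int) (r : Int) (n : Int) : Prop := 0 ≤ r ∧ (m ≠ 0 ∨ r = 0)
instance (m : Int) (r : Int) (n : Int) : Decidable (Pre_K m r n) := by unfold Pre_K; infer_instance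
def pvWitness_K : Int × Int × Int := (5, 6, 4)

def Spec_K (m : Int) (r : Int) (n : Int) (out : Int) : Prop := out = K_alt m r n
instance (m : Int) (r : Int) (n : Int) (out : Int) : Decidable (Spec_K m r n out) := by unfold Spec_K; infer_instance

-- ===== CLAIM (what is proved, stated in full; the proofs are below) =====
def Claim_equal_K : Prop := ∀ (m : Int) (r : Int) (n : Int), Dom_K m r n → Pre_K m r n → Spec_K m r n (K m r n)

-- ===== LEMMAS AND PROOFS =====

-- list sum over a range as a Finset sum
lemma list_sum_range (n : Nat) (f : Nat → Int) :
    ((List.range n).map f).sum = ∑ i ∈ Finset.range n, f i := by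
  induction n with
  | zero => simp
  | succ k ih => rw [List.range_succ, Finset.sum_range_succ]; simp [ih]

-- A's loop body written additively
lemma stepA_eq (r n a k : Int) :
    stepA r n a k
      = a + (-1 : Int) ^ k.toNat
            * PySem.Int.floordiv (pyFact n) (pyFact k * pyFact (n - k))
            * (n - k) ^ r.toNat := rfl

-- A's binomial coefficient at k = j (0 ≤ j ≤ N) is C(N, j)
lemma binomA_eq (N j : Nat) (hj : j ≤ N) :
    PySem.Int.floordiv (pyFact (N : Int)) (pyFact (j : Int) * pyFact ((N : Int) - (j : Int)))
      = (N.choose j : Int) := by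
  have h1 : ((N : Int) - (j : Int)).toNat = N - j := by omega
  simp only [pyFact, Int.toNat_natCast, h1]
  rw [← Nat.cast_mul, PySem.Int.floordiv_natCast]
  rw [Nat.choose_eq_factorial_div_factorial hj]

lemma diffPass_cons₂ (a b : Int) (l : List Int) :
    diffPass (a :: b :: l) = (b - a) :: diffPass (b :: l) := rfl

lemma range_map_split (f : Nat → Int) (L : Nat) :
    (List.range (L + 1)).map f = f 0 :: (List.range L).map (fun i => f (i + 1)) := by
  rw [List.range_succ_eq_map]; simp [List.map_map, Function.comp]

-- one pass over a tabulated function differences it pointwise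
lemma diffPass_map_range (g : Nat → Int) (L : Nat) :
    diffPass ((List.range (L + 1)).map g) = (List.range L).map (fun i => g (i + 1) - g i) := by
  induction L generalizing g with
  | zero => simp [diffPass]
  | succ L ih =>
    rw [range_map_split g (L + 1), range_map_split (fun i => g (i + 1)) L,
      diffPass_cons₂, ← range_map_split (fun i => g (i + 1)) L, ih (fun i => g (i + 1)),
      range_map_split (fun i => g (i + 1) - g i) L]

-- Pascal/telescoping step for the iterated difference
set_option maxHeartbeats 1000000 in
lemma pascal_sum (g : Nat → Int) (t i : Nat) :
    ∑ s ∈ Finset.range (t + 1), (-1 : Int) ^ (t + s) * (t.choose s) * (g (i + s + 1) - g (i + s))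
      = ∑ s ∈ Finset.range (t + 2), (-1 : Int) ^ (t + 1 + s) * ((t + 1).choose s) * g (i + s) := by
  rw [Finset.sum_range_succ' (fun s => (-1 : Int) ^ (t + 1 + s) * ((t + 1).choose s) * g (i + s)) (t + 1)]
  have key : ∀ s ∈ Finset.range (t + 1),
      (-1 : Int) ^ (t + s) * (t.choose s) * (g (i + s + 1) - g (i + s))
        = (-1 : Int) ^ (t + 1 + (s + 1)) * ((t + 1).choose (s + 1)) * g (i + (s + 1))
          + (((-1 : Int) ^ (t + s + 1) * (t.choose s) * g (i + s))
             - ((-1 : Int) ^ (t + (s + 1) + 1) * (t.choose (s + 1)) * g (i + (s + 1)))) := by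
    intro s _
    simp only [Nat.choose_succ_succ, add_assoc]
    push_cast
    ring
  rw [Finset.sum_congr rfl key, Finset.sum_add_distrib,
    Finset.sum_range_sub' (fun s => (-1 : Int) ^ (t + s + 1) * (t.choose s) * g (i + s)) (t + 1)]
  congr 1
  simp [Nat.choose_succ_self]

-- t differencing passes over a tabulated function of length L + t
lemma iter_diff (t : Nat) (g : Nat → Int) (L : Nat) :
    (List.range t).foldl (fun l _ => diffPass l) ((List.range (L + t)).map g)
      = (List.range L).map
          (fun i => ∑ s ∈ Finset.range (t + 1), (-1 : Int) ^ (t + s) * (t.choose s) * g (i + s)) := by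
  induction t generalizing g with
  | zero => simp
  | succ t ih =>
    rw [List.range_succ_eq_map, List.foldl_cons, List.foldl_map,
      show L + (t + 1) = (L + t) + 1 from rfl, diffPass_map_range g (L + t),
      ih (fun i => g (i + 1) - g i)]
    simp only [pascal_sum]

-- reflecting A's sum k ↦ n - k turns it into B's
lemma sums_eq (R N : Nat) :
    ∑ k ∈ Finset.range (N + 1), (-1 : Int) ^ k * (N.choose k) * ((N : Int) - k) ^ R
      = ∑ s ∈ Finset.range (N + 1), (-1 : Int) ^ (N + s) * (N.choose s) * (s : Int) ^ R := by
  rw [← Finset.sum_range_reflect (fun s => (-1 : Int) ^ (N + s) * (N.choose s) * (s : Int) ^ R) (N + 1)]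
  refine Finset.sum_congr rfl ?_
  intro k hk
  have hk' : k ≤ N := by
    have := Finset.mem_range.mp hk; omega
  have h1 : N + 1 - 1 - k = N - k := by omega
  have h2 : ((N - k : Nat) : Int) = (N : Int) - k := by
    have := Int.natCast_sub hk'; omega
  have h3 : N + (N - k) = k + 2 * (N - k) := by omega
  rw [h1, h2, Nat.choose_symm hk', h3, pow_add, pow_mul]
  norm_num

-- A's numerator as a Finset sum
lemma numA_eq (r : Int) (N : Nat) :
    (PySem.List.pyRange 0 ((N : Int) + 1) 1).foldl (stepA r (N : Int)) 0
      = ∑ k ∈ Finset.range (N + 1), (-1 : Int) ^ k * (N.choose k) * ((N : Int) - k) ^ r.toNat := by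
  rw [show ((N : Int) + 1) = ((N + 1 : Nat) : Int) by push_cast; ring,
    PySem.List.pyRange_zero_natCast, List.foldl_map]
  simp only [stepA_eq]
  rw [PySem.List.foldl_add (List.range (N + 1))
    (fun k => (-1 : Int) ^ ((k : Int)).toNat
      * PySem.Int.floordiv (pyFact (N : Int)) (pyFact (k : Int) * pyFact ((N : Int) - (k : Int)))
      * ((N : Int) - (k : Int)) ^ r.toNat) 0, list_sum_range]
  refine (zero_add _).trans (Finset.sum_congr rfl ?_)
  intro k hk
  rw [binomA_eq N k (by have := Finset.mem_range.mp hk; omega), Int.toNat_natCast]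

-- B's numerator equals the reflected sum
lemma numB_eq (r : Int) (N : Nat) :
    (((List.range N).foldl (fun l _ => diffPass l)
        ((PySem.List.pyRange 0 ((N : Int) + 1) 1).map (fun j => j ^ r.toNat))).headD 0)
      = ∑ s ∈ Finset.range (N + 1), (-1 : Int) ^ (N + s) * (N.choose s) * (s : Int) ^ r.toNat := by
  rw [show ((N : Int) + 1) = ((N + 1 : Nat) : Int) by push_cast; ring,
    PySem.List.pyRange_zero_natCast, List.map_map,
    show ((fun j => j ^ r.toNat) ∘ fun k : Nat => ((k : Int))) = (fun s : Nat => ((s : Int)) ^ r.toNat) from rfl,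
    show List.range (N + 1) = List.range (1 + N) by rw [Nat.add_comm],
    iter_diff N (fun s => ((s : Int)) ^ r.toNat) 1]
  simp

-- ===== VERDICT (by name: the statement is the Claim_ definition above) =====
theorem K_spec : Claim_equal_K := by
  intro m r n _ _
  unfold Spec_K K K_alt
  by_cases hn : n < 0
  · rw [if_pos hn, PySem.List.pyRange_one_eq_nil (by omega)]
    simp [PySem.Int.floordiv]
  · rw [if_neg hn]
    obtain ⟨N, rfl⟩ := Int.eq_ofNat_of_zero_le (by omega : (0:Int) ≤ n)
    rw [Int.toNat_natCast, numA_eq, sums_eq, ← numB_eq]
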